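-- pv_equiv track=rewrite | github.com/hubaimaster/aws-interface | aws_interface/resource/util.py | split_pk_sk
-- ===== SOURCE A (Python) =====
-- def split_pk_sk(merged_id):
--     keys = []
--     p_c = None
--     buffer = ''
--     for c in merged_id:
--         if c == '&' and p_c != '-':
--             keys.append(buffer.replace('-&', '&'))
--             buffer = ''
--         else:
--             buffer += c
--         p_c = c
--
--     # 마지막 남은 버퍼
--     if buffer:
--         keys.append(buffer.replace('-&', '&'))
--     # pk, sk
--     return keys[0], keys[1]
-- ===== SOURCE B (Python) =====
-- import re
--
-- def split_pk_sk(merged_id):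
--     parts = re.split(r'(?<!-)&', merged_id)
--     if parts and parts[-1] == '':
--         parts.pop()
--     parts = [p.replace('-&', '&') for p in parts]
--     return parts[0], parts[1]
-- ===== Notes on version B (the rewrite author's own statement) =====
-- stated objective: idiomatic
-- what changed: Replaces A's character-by-character state machine (previous-char tracking, growing buffer, append-on-split) by a regex split on '&' with a negative lookbehind for '-', a one-line trailing-empty pop and a comprehension for un-escaping; Pre_ excludes only inputs where both programs raise IndexError (fewer than two keys).
import Mathlib
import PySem

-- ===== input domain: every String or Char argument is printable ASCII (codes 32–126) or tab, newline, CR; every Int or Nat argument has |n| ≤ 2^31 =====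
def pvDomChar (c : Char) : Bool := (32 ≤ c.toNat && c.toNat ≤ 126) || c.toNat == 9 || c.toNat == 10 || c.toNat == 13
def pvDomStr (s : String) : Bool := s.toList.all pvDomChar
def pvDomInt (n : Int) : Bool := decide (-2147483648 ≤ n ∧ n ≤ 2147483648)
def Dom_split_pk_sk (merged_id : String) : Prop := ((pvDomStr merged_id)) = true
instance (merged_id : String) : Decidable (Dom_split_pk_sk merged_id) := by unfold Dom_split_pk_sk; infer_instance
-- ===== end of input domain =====

-- B replaces A's character-by-character state machine by a lookbehind-style split into
-- segments, a single trailing-empty pop and a map for un-escaping (idiomatic, same cost).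

-- ===== PORT A =====
-- A's loop: state (keys, p_c, buffer); strings carried as List Char (PySem convention),
-- joined to String only at the very end.  keys[0]/keys[1] raise IndexError when absent:
-- those inputs are excluded by Pre_ below (the .getD default is never reached inside Pre_).
def pvStepA (st : List (List Char) × Option Char × List Char) (c : Char) :
    List (List Char) × Option Char × List Char :=
  let (keys, p_c, buffer) := st
  if c = '&' ∧ p_c ≠ some '-' then
    (keys ++ [PySem.Chars.replace buffer ['-', '&'] ['&']], some c, [])
  else
    (keys, some c, buffer ++ [c])

def split_pk_sk (merged_id : String) : String × String :=
  let fin := merged_id.toList.foldl pvStepA ([], none, [])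
  let keys := if fin.2.2 ≠ [] then
      fin.1 ++ [PySem.Chars.replace fin.2.2 ['-', '&'] ['&']]
    else fin.1
  (String.mk (keys.getD 0 []), String.mk (keys.getD 1 []))

-- ===== PORT B =====
-- hand port of re.split(r'(?<!-)&', s): structural recursion producing the segments,
-- exact on the whole domain (the pattern matches one '&' not preceded by '-')
def pvSplitUnesc : Option Char → List Char → List (List Char)
  | _, [] => [[]]
  | p, c :: rest =>
      if c = '&' ∧ p ≠ some '-' then [] :: pvSplitUnesc (some c) rest
      else
        match pvSplitUnesc (some c) rest with
        | [] => [[c]]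
        | s :: ss => (c :: s) :: ss

-- `if parts and parts[-1] == '': parts.pop()`
def pvPopTrailingEmpty (l : List (List Char)) : List (List Char) :=
  if l.getLast? = some ([] : List Char) then l.dropLast else l

def split_pk_sk_alt (merged_id : String) : String × String :=
  let parts := pvPopTrailingEmpty (pvSplitUnesc none merged_id.toList)
  let keys := parts.map (fun p => PySem.Chars.replace p ['-', '&'] ['&'])
  (String.mk (keys.getD 0 []), String.mk (keys.getD 1 []))

-- ===== PRECONDITION & SPEC =====
-- Pre_ excludes exactly the inputs on which Python A raises IndexError (fewer than two
-- keys): there must be an unescaped '&' (one whose predecessor is not '-'), and if the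
-- only one is the final character (its key is the empty trailing buffer, dropped) a second
-- unescaped '&' is required.
def pvPairF (pc : Option Char × Char) : Bool := pc.2 == '&' && !(pc.1 == some '-')

def Pre_split_pk_sk (merged_id : String) : Prop :=
  let pairs := List.zip ((none : Option Char) :: merged_id.toList.map some) merged_id.toList
  let n := (pairs.filter pvPairF).length
  if ((pairs.getLast?).map pvPairF).getD false then 2 ≤ n else 1 ≤ n
instance (merged_id : String) : Decidable (Pre_split_pk_sk merged_id) := by
  unfold Pre_split_pk_sk; infer_instance

def pvWitness_split_pk_sk : String := "pk&sk"

def Spec_split_pk_sk (merged_id : String) (out : String × String) : Prop := out = split_pk_sk_alt merged_id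
instance (merged_id : String) (out : String × String) : Decidable (Spec_split_pk_sk merged_id out) := by unfold Spec_split_pk_sk; infer_instance

-- ===== CLAIM (what is proved, stated in full; the proofs are below) =====
def Claim_equal_split_pk_sk : Prop := ∀ (merged_id : String), Dom_split_pk_sk merged_id → Pre_split_pk_sk merged_id → Spec_split_pk_sk merged_id (split_pk_sk merged_id)

-- ===== LEMMAS AND PROOFS =====

lemma pvSplitUnesc_ne_nil (p : Option Char) (cs : List Char) : pvSplitUnesc p cs ≠ [] := by
  cases cs with
  | nil => simp [pvSplitUnesc]
  | cons c rest =>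
      simp only [pvSplitUnesc]
      split
      · simp
      · rcases h : pvSplitUnesc (some c) rest with _ | ⟨s, ss⟩ <;> simp

-- consing a prefix onto the head segment
def pvConsHd (buf : List Char) : List (List Char) → List (List Char)
  | [] => [buf]
  | s :: ss => (buf ++ s) :: ss

lemma pvPop_cons {ss : List (List Char)} (h : ss ≠ []) (b : List Char) :
    pvPopTrailingEmpty (b :: ss) = b :: pvPopTrailingEmpty ss := by
  cases ss with
  | nil => simp at h
  | cons x xs =>
      simp only [pvPopTrailingEmpty, List.getLast?_cons_cons]
      split <;> simp

-- A's finalisation: append the leftover buffer if non-empty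
def pvFinA (st : List (List Char) × Option Char × List Char) : List (List Char) :=
  if st.2.2 ≠ [] then st.1 ++ [PySem.Chars.replace st.2.2 ['-', '&'] ['&']] else st.1

lemma pvFold_eq (cs : List Char) : ∀ (p : Option Char) (keys : List (List Char)) (buf : List Char),
    pvFinA (cs.foldl pvStepA (keys, p, buf)) =
      keys ++ (pvPopTrailingEmpty (pvConsHd buf (pvSplitUnesc p cs))).map
        (fun s => PySem.Chars.replace s ['-', '&'] ['&']) := by
  induction cs with
  | nil =>
      intro p keys buf
      by_cases hb : buf = []
      · subst hb; simp [pvFinA, pvSplitUnesc, pvConsHd, pvPopTrailingEmpty]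
      · simp [pvFinA, pvSplitUnesc, pvConsHd, pvPopTrailingEmpty, hb]
  | cons c rest ih =>
      intro p keys buf
      rw [List.foldl_cons]
      by_cases h : c = '&' ∧ p ≠ some '-'
      · have hstep : pvStepA (keys, p, buf) c
            = (keys ++ [PySem.Chars.replace buf ['-', '&'] ['&']], some c, []) := by
          simp [pvStepA, h]
        rw [hstep, ih (some c) _ []]
        have hne := pvSplitUnesc_ne_nil (some c) rest
        have hsplit : pvSplitUnesc p (c :: rest) = [] :: pvSplitUnesc (some c) rest := by
          simp [pvSplitUnesc, h]
        rw [hsplit]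
        rcases hs : pvSplitUnesc (some c) rest with _ | ⟨s, ss⟩
        · exact absurd hs hne
        · have : pvConsHd buf ([] :: s :: ss) = buf :: s :: ss := by simp [pvConsHd]
          rw [this, pvPop_cons (by simp) buf]
          simp [pvConsHd, List.map_cons]
      · have hstep : pvStepA (keys, p, buf) c = (keys, some c, buf ++ [c]) := by
          simp only [pvStepA]
          rw [if_neg h]
        rw [hstep, ih (some c) keys (buf ++ [c])]
        have hne := pvSplitUnesc_ne_nil (some c) rest
        rcases hs : pvSplitUnesc (some c) rest with _ | ⟨s, ss⟩
        · exact absurd hs hne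
        · have hsplit : pvSplitUnesc p (c :: rest) = (c :: s) :: ss := by
            simp only [pvSplitUnesc]
            rw [if_neg h, hs]
          rw [hsplit]
          simp [pvConsHd, List.append_assoc]

lemma pvKeys_eq (merged_id : String) : split_pk_sk merged_id = split_pk_sk_alt merged_id := by
  simp only [split_pk_sk, split_pk_sk_alt]
  have h := pvFold_eq merged_id.toList none [] []
  have hc : pvConsHd [] (pvSplitUnesc none merged_id.toList)
      = pvSplitUnesc none merged_id.toList := by
    rcases hs : pvSplitUnesc none merged_id.toList with _ | ⟨s, ss⟩
    · exact absurd hs (pvSplitUnesc_ne_nil none merged_id.toList)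
    · simp [pvConsHd]
  rw [hc] at h
  simp only [pvFinA] at h
  rw [h]
  simp

-- ===== VERDICT (by name: the statement is the Claim_ definition above) =====
theorem split_pk_sk_spec : Claim_equal_split_pk_sk := by
  intro merged_id _ _
  unfold Spec_split_pk_sk
  exact pvKeys_eq merged_id
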